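-- pv_equiv track=rewrite | github.com/AmyRaff/Datasets-Issues | 1_get_images.py | parse_labels_to_targets
-- ===== SOURCE A (Python) =====
-- def parse_labels_to_targets(raw_label_str):
--     """
--     Map NIH ChestX-ray14 labels to the requested 6-class set.
--     - Effusion -> pleural effusion
--     - Mass or Nodule -> lung cancer
--     - Keep Cardiomegaly, Pneumonia, Pneumothorax
--     - 'No Finding' stays 'no finding' ONLY if it's the sole label
--     Returns a sorted list of target class names (could be multiple).
--     """
--     if not isinstance(raw_label_str, str) or not raw_label_str.strip():
--         return []
--
--     parts = [p.strip().lower() for p in raw_label_str.split("|") if p.strip()]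
--     parts_set = set(parts)
--
--     # If it's exactly "no finding", treat as that single class
--     if parts_set == {"no finding"}:
--         return ["no finding"]
--
--     targets = set()
--     if "cardiomegaly" in parts_set:
--         targets.add("cardiomegaly")
--     if "effusion" in parts_set:
--         targets.add("pleural effusion")
--     if "pneumonia" in parts_set:
--         targets.add("pneumonia")
--     if "pneumothorax" in parts_set:
--         targets.add("pneumothorax")
--     if "mass" in parts_set or "nodule" in parts_set:
--         targets.add("lung cancer")
--
--     return sorted(list(targets))
-- ===== SOURCE B (Python) =====
-- # Output is built directly in sorted order by iterating over the fixed,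
-- # alphabetically ordered target table: no targets set and no sort call.
-- _TARGETS = [
--     ("cardiomegaly", ["cardiomegaly"]),
--     ("lung cancer", ["mass", "nodule"]),
--     ("pleural effusion", ["effusion"]),
--     ("pneumonia", ["pneumonia"]),
--     ("pneumothorax", ["pneumothorax"]),
-- ]
--
-- def parse_labels_to_targets(raw_label_str):
--     if not isinstance(raw_label_str, str) or not raw_label_str.strip():
--         return []
--     parts = {p.strip().lower() for p in raw_label_str.split("|") if p.strip()}
--     if parts == {"no finding"}:
--         return ["no finding"]
--     return [target for target, sources in _TARGETS
--             if any(s in parts for s in sources)]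
-- ===== Notes on version B (the rewrite author's own statement) =====
-- stated objective: alternative
-- what changed: Instead of accumulating matched targets in a set and sorting it, B iterates over a fixed alphabetically ordered target table and emits each target whose source labels intersect the parsed parts, so the result is constructed directly in sorted order with no targets set and no sort call.
import Mathlib
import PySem

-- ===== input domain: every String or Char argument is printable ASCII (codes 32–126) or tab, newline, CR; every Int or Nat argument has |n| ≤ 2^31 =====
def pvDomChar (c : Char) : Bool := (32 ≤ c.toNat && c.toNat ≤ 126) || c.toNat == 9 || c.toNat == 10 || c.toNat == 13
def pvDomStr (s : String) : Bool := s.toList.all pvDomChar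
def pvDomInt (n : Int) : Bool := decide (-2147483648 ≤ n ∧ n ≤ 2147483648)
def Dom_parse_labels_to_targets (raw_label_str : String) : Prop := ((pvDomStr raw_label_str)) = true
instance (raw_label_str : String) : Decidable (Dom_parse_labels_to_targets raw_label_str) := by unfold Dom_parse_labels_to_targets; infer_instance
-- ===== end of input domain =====

-- B builds the result directly in sorted order from a fixed ordered target table, with no targets set and no sort call (alternative decomposition; same result).

-- ===== PORT A =====
-- shared parse step: [p.strip().lower() for p in raw.split("|") if p.strip()]
def pvParts (raw_label_str : String) : List String :=
  ((PySem.Str.split? raw_label_str "|").getD []).filterMap (fun p =>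
    if PySem.Str.strip p = "" then none else some (PySem.Str.lower (PySem.Str.strip p)))

def parse_labels_to_targets (raw_label_str : String) : List String :=
  if PySem.Str.strip raw_label_str = "" then []
  else
    let parts := pvParts raw_label_str
    let parts_set : PySem.Set String := PySem.Set.ofList parts
    if PySem.Set.equal parts_set (PySem.Set.ofList ["no finding"]) then ["no finding"]
    else
      let t0 : PySem.Set String := PySem.Set.empty
      let t1 := if parts_set.contains "cardiomegaly" then PySem.Set.add t0 "cardiomegaly" else t0
      let t2 := if parts_set.contains "effusion" then PySem.Set.add t1 "pleural effusion" else t1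
      let t3 := if parts_set.contains "pneumonia" then PySem.Set.add t2 "pneumonia" else t2
      let t4 := if parts_set.contains "pneumothorax" then PySem.Set.add t3 "pneumothorax" else t3
      let t5 := if parts_set.contains "mass" || parts_set.contains "nodule" then PySem.Set.add t4 "lung cancer" else t4
      PySem.List.sorted t5 (fun x => x) false

-- ===== PORT B =====
-- the fixed, alphabetically ordered target table of Source B
def pvTargets : List (String × List String) :=
  [("cardiomegaly", ["cardiomegaly"]),
   ("lung cancer", ["mass", "nodule"]),
   ("pleural effusion", ["effusion"]),
   ("pneumonia", ["pneumonia"]),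
   ("pneumothorax", ["pneumothorax"])]

def parse_labels_to_targets_alt (raw_label_str : String) : List String :=
  if PySem.Str.strip raw_label_str = "" then []
  else
    let parts : PySem.Set String := PySem.Set.ofList (pvParts raw_label_str)
    if PySem.Set.equal parts (PySem.Set.ofList ["no finding"]) then ["no finding"]
    else
      (pvTargets.filter (fun ts => ts.2.any (fun s => parts.contains s))).map Prod.fst

-- ===== PRECONDITION & SPEC =====
def Spec_parse_labels_to_targets (raw_label_str : String) (out : List String) : Prop := out = parse_labels_to_targets_alt raw_label_str
instance (raw_label_str : String) (out : List String) : Decidable (Spec_parse_labels_to_targets raw_label_str out) := by unfold Spec_parse_labels_to_targets; infer_instance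

-- ===== CLAIM (what is proved, stated in full; the proofs are below) =====
def Claim_equal_parse_labels_to_targets : Prop := ∀ (raw_label_str : String), Dom_parse_labels_to_targets raw_label_str → Spec_parse_labels_to_targets raw_label_str (parse_labels_to_targets raw_label_str)

-- ===== LEMMAS AND PROOFS =====

set_option maxRecDepth 16384 in
theorem pv_targets_eq (ps : PySem.Set String) :
    (PySem.List.sorted
      (let t0 : PySem.Set String := PySem.Set.empty
       let t1 := if ps.contains "cardiomegaly" then PySem.Set.add t0 "cardiomegaly" else t0
       let t2 := if ps.contains "effusion" then PySem.Set.add t1 "pleural effusion" else t1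
       let t3 := if ps.contains "pneumonia" then PySem.Set.add t2 "pneumonia" else t2
       let t4 := if ps.contains "pneumothorax" then PySem.Set.add t3 "pneumothorax" else t3
       if ps.contains "mass" || ps.contains "nodule" then PySem.Set.add t4 "lung cancer" else t4)
      (fun x => x) false) =
    (pvTargets.filter (fun ts => ts.2.any (fun s => ps.contains s))).map Prod.fst := by
  by_cases h1 : ps.contains "cardiomegaly" = true <;>
    by_cases h2 : ps.contains "effusion" = true <;>
    by_cases h3 : ps.contains "pneumonia" = true <;>
    by_cases h4 : ps.contains "pneumothorax" = true <;>
    by_cases h5 : ps.contains "mass" = true <;>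
    by_cases h6 : ps.contains "nodule" = true <;>
    simp only [pvTargets, List.filter_cons, List.filter_nil, List.any_cons, List.any_nil,
      List.map_cons, List.map_nil, h1, h2, h3, h4, h5, h6, Bool.false_eq_true,
      Bool.or_false, Bool.or_true, Bool.or_self,
      if_true, if_false] <;>
    (first | rfl | (apply PySem.List.sorted_id_eq_of_perm_of_pairwise <;>
       first
         | decide
         | (simp only [List.pairwise_cons, List.Pairwise.nil, String.le_iff_toList_le]; decide)))

-- ===== VERDICT (by name: the statement is the Claim_ definition above) =====
theorem parse_labels_to_targets_spec : Claim_equal_parse_labels_to_targets := by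
  intro raw _
  unfold Spec_parse_labels_to_targets parse_labels_to_targets parse_labels_to_targets_alt
  by_cases hs : PySem.Str.strip raw = ""
  · simp [hs]
  · simp only [hs, if_false]
    by_cases hn : PySem.Set.equal (PySem.Set.ofList (pvParts raw)) (PySem.Set.ofList ["no finding"]) = true
    · simp [hn]
    · simp only [hn]
      exact pv_targets_eq (PySem.Set.ofList (pvParts raw))
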